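-- pv_equiv track=rewrite | github.com/82080038/sprin | python/fix_json_nrp_correct.py | find_matching_csv_record
-- ===== SOURCE A (Python) =====
-- def find_matching_csv_record(csv_data, personil_name):
--     """Find matching record in CSV data"""
--     # Try exact match first
--     for record in csv_data:
--         if record['nama'].strip().lower() == personil_name.strip().lower():
--             return record
--
--     # Try partial match (handle name variations)
--     personil_words = personil_name.lower().split()
--     for record in csv_data:
--         csv_words = record['nama'].lower().split()
--
--         # Check if most words match
--         match_count = 0
--         for word in personil_words:
--             if word in csv_words:
--                 match_count += 1
--
--         # If at least 2 words match, consider it a match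
--         if match_count >= 2 and len(personil_words) >= 2:
--             return record
--
--     return None
-- ===== SOURCE B (Python) =====
-- def find_matching_csv_record(csv_data, personil_name):
--     """Find matching record in CSV data (single stateful pass)."""
--     exact_key = personil_name.strip().lower()
--     pwords = personil_name.lower().split()
--     first_partial = None
--     for record in csv_data:
--         if record['nama'].strip().lower() == exact_key:
--             return record
--         if first_partial is None and len(pwords) >= 2:
--             cwords = record['nama'].lower().split()
--             if sum(1 for w in pwords if w in cwords) >= 2:
--                 first_partial = record
--     return first_partial
-- ===== Notes on version B (the rewrite author's own statement) =====
-- stated objective: alternative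
-- what changed: Replaced A's two sequential scans (exact-match pass, then partial-match pass) by a single stateful traversal that returns immediately on an exact match and keeps the first partial candidate in an accumulator, with the normalized key and query words precomputed once.
import Mathlib
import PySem

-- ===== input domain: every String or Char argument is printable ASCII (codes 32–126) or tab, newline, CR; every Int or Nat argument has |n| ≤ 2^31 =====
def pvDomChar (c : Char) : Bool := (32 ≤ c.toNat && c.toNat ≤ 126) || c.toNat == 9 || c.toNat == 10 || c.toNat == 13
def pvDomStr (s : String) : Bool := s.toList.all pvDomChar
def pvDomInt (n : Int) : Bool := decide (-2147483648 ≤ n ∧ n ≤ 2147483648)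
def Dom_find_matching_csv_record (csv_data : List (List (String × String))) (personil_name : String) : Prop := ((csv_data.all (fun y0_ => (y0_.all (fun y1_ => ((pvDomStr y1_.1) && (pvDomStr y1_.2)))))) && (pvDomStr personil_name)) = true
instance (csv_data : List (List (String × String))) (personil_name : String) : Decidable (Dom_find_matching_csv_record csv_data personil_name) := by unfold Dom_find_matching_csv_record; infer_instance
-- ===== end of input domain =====

-- B folds A's two sequential scans into one stateful pass keeping the first partial candidate (objective: alternative decomposition, same cost).
-- Pre_ excludes only lists containing a record without a 'nama' key (A may raise KeyError there).

-- ===== PORT A =====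
-- record['nama'] (first match in the association list; Pre_ guarantees presence, "" only outside Pre_)
def fmcrGetNama (r : List (String × String)) : String :=
  (((r.find? (fun p => p.1 == "nama")).map Prod.snd).getD "")

-- first loop of A: exact match on strip().lower()
def fmcrExactLoop (csv : List (List (String × String))) (personil_name : String) :
    Option (List (String × String)) :=
  match csv with
  | [] => none
  | r :: t =>
    if PySem.Str.lower (PySem.Str.strip (fmcrGetNama r)) ==
        PySem.Str.lower (PySem.Str.strip personil_name) then some r
    else fmcrExactLoop t personil_name

-- inner word-count loop of A
def fmcrMatchCount (pwords cwords : List String) : Int :=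
  pwords.foldl (fun acc w => if cwords.contains w then acc + 1 else acc) 0

-- second loop of A: partial match
def fmcrPartialLoop (csv : List (List (String × String))) (pwords : List String) :
    Option (List (String × String)) :=
  match csv with
  | [] => none
  | r :: t =>
    let cwords := PySem.Str.split₀ (PySem.Str.lower (fmcrGetNama r))
    if 2 ≤ fmcrMatchCount pwords cwords ∧ 2 ≤ pwords.length then some r
    else fmcrPartialLoop t pwords

def find_matching_csv_record (csv_data : List (List (String × String))) (personil_name : String) : Option (List (String × String)) :=
  match fmcrExactLoop csv_data personil_name with
  | some r => some r
  | none => fmcrPartialLoop csv_data (PySem.Str.split₀ (PySem.Str.lower personil_name))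

-- ===== PORT B =====
-- single pass with the first-partial accumulator (Source B's loop)
def fmcrAltLoop (csv : List (List (String × String))) (exact_key : String)
    (pwords : List String) (first_partial : Option (List (String × String))) :
    Option (List (String × String)) :=
  match csv with
  | [] => first_partial
  | r :: t =>
    if PySem.Str.lower (PySem.Str.strip (fmcrGetNama r)) == exact_key then some r
    else
      let first_partial' :=
        if first_partial.isNone ∧ 2 ≤ pwords.length then
          let cwords := PySem.Str.split₀ (PySem.Str.lower (fmcrGetNama r))
          if 2 ≤ fmcrMatchCount pwords cwords then some r else first_partial
        else first_partial
      fmcrAltLoop t exact_key pwords first_partial'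

def find_matching_csv_record_alt (csv_data : List (List (String × String))) (personil_name : String) : Option (List (String × String)) :=
  fmcrAltLoop csv_data (PySem.Str.lower (PySem.Str.strip personil_name))
    (PySem.Str.split₀ (PySem.Str.lower personil_name)) none

-- ===== PRECONDITION & SPEC =====
-- Pre_ excludes exactly the inputs on which A raises KeyError: a record without a 'nama' key that is reached, i.e. not preceded by an exact-match record.
def Pre_find_matching_csv_record (csv_data : List (List (String × String))) (personil_name : String) : Prop :=
  ∀ i : Fin csv_data.length, ((csv_data.get i).find? (fun p => p.1 == "nama")).isNone →
    ∃ j : Fin csv_data.length, j.val < i.val ∧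
      PySem.Str.lower (PySem.Str.strip (fmcrGetNama (csv_data.get j))) =
        PySem.Str.lower (PySem.Str.strip personil_name)
instance (csv_data : List (List (String × String))) (personil_name : String) : Decidable (Pre_find_matching_csv_record csv_data personil_name) := by unfold Pre_find_matching_csv_record; infer_instance

def pvWitness_find_matching_csv_record : (List (List (String × String))) × String :=
  ([[("nama", "Budi Santoso"), ("id", "1")], [("nama", "Ali"), ("id", "2")]], "budi  santoso")

def Spec_find_matching_csv_record (csv_data : List (List (String × String))) (personil_name : String) (out : Option (List (String × String))) : Prop := out = find_matching_csv_record_alt csv_data personil_name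
instance (csv_data : List (List (String × String))) (personil_name : String) (out : Option (List (String × String))) : Decidable (Spec_find_matching_csv_record csv_data personil_name out) := by unfold Spec_find_matching_csv_record; infer_instance

-- ===== CLAIM (what is proved, stated in full; the proofs are below) =====
def Claim_equal_find_matching_csv_record : Prop := ∀ (csv_data : List (List (String × String))) (personil_name : String), Dom_find_matching_csv_record csv_data personil_name → Pre_find_matching_csv_record csv_data personil_name → Spec_find_matching_csv_record csv_data personil_name (find_matching_csv_record csv_data personil_name)

-- ===== LEMMAS AND PROOFS =====

-- B's single pass equals: first exact match if any, else the accumulator-or-first-partial.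
theorem fmcrAltLoop_eq (csv : List (List (String × String))) (personil_name : String)
    (pwords : List String) (acc : Option (List (String × String))) :
    fmcrAltLoop csv (PySem.Str.lower (PySem.Str.strip personil_name)) pwords acc =
      match fmcrExactLoop csv personil_name with
      | some r => some r
      | none => acc.or (fmcrPartialLoop csv pwords) := by
  induction csv generalizing acc with
  | nil => simp [fmcrAltLoop, fmcrExactLoop, fmcrPartialLoop]
  | cons r t ih =>
    by_cases hx : PySem.Str.lower (PySem.Str.strip (fmcrGetNama r)) ==
        PySem.Str.lower (PySem.Str.strip personil_name)
    · simp [fmcrAltLoop, fmcrExactLoop, hx]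
    · rw [fmcrAltLoop, fmcrExactLoop]
      simp only [hx, if_false]
      rw [ih]
      cases hfe : fmcrExactLoop t personil_name with
      | some s => rfl
      | none =>
        rw [fmcrPartialLoop]
        cases acc with
        | some a => simp
        | none =>
          simp only [Option.isNone_none, Option.none_or, true_and]
          by_cases hlen : 2 ≤ pwords.length
          · by_cases hcnt : 2 ≤ fmcrMatchCount pwords
                (PySem.Str.split₀ (PySem.Str.lower (fmcrGetNama r)))
            · simp [hlen, hcnt]
            · simp [hlen, hcnt]
          · simp [hlen]

-- ===== VERDICT (by name: the statement is the Claim_ definition above) =====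
theorem find_matching_csv_record_spec : Claim_equal_find_matching_csv_record := by
  intro csv_data personil_name _ _
  unfold Spec_find_matching_csv_record find_matching_csv_record find_matching_csv_record_alt
  rw [fmcrAltLoop_eq]
  cases fmcrExactLoop csv_data personil_name <;> simp
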